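-- pv_equiv track=rewrite | github.com/Gabri16/Tic-tac-toe | ai.py | blocking_strategy
-- ===== SOURCE A (Python) =====
-- def blocking_strategy(symbol, matrix):
--     turn = ()
--
--     # checks rows for player's moves
--     for row in range(len(matrix)):
--         player_populated_fields = 0
--         for col in range(len(matrix)):
--             if matrix[row][col] == symbol:
--                 player_populated_fields += 1
--         # if row is almost fully populated (except for one field), find 'blank' space and populate it
--         if player_populated_fields == len(matrix) - 1:
--             for col in range(len(matrix)):
--                 if matrix[row][col] == ' ':
--                     turn = (row, col)
--                     return turn
--
--     # checks cols for player's moves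
--     for col in range(len(matrix)):
--         player_populated_fields = 0
--         for row in range(len(matrix)):
--             if matrix[row][col] == symbol:
--                 player_populated_fields += 1
--         # if col is almost fully populated (except for one field), find 'blank' space and populate it
--         if player_populated_fields == len(matrix) - 1:
--             for row in range(len(matrix)):
--                 if matrix[row][col] == ' ':
--                     turn = (row, col)
--                     return turn
--
--     # checks diagonal for player's moves
--     player_populated_fields = 0
--     for row_col in range(len(matrix)):
--         if matrix[row_col][row_col] == symbol:
--             player_populated_fields += 1
--     # if diagonal is almost fully populated (except for one field), find 'blank' space and populate it
--     if player_populated_fields == len(matrix) - 1: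
--         for row_col in range(len(matrix)):
--             if matrix[row_col][row_col] == ' ':
--                 turn = (row_col, row_col)
--                 return turn
--
--     # checks antidiagonal for player's moves
--     player_populated_fields = 0
--     for row_col in range(len(matrix)):
--         if matrix[row_col][len(matrix) - 1 - row_col] == symbol:
--             player_populated_fields += 1
--     # if antidiagonal is almost fully populated (except for one field), find 'blank' space and populate it
--     if player_populated_fields == len(matrix) - 1:
--         for row_col in range(len(matrix)):
--             if matrix[row_col][len(matrix) - 1 - row_col] == ' ':
--                 turn = (row_col, len(matrix) - 1 - row_col)
--                 return turn
--
--     # if nothing to block was found, return None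
--     return None
-- ===== SOURCE B (Python) =====
-- def blocking_strategy(symbol, matrix):
--     n = len(matrix)
--     row_cnt = [0] * n
--     col_cnt = [0] * n
--     diag_cnt = 0
--     anti_cnt = 0
--     row_blank = [None] * n
--     col_blank = [None] * n
--     diag_blank = None
--     anti_blank = None
--     # one pass over the grid: tally symbol counts and remember the first blank of every line
--     for r in range(n):
--         for c in range(n):
--             cell = matrix[r][c]
--             if cell == symbol:
--                 row_cnt[r] += 1
--                 col_cnt[c] += 1
--                 if r == c:
--                     diag_cnt += 1
--                 if c == n - 1 - r:
--                     anti_cnt += 1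
--             if cell == ' ':
--                 if row_blank[r] is None:
--                     row_blank[r] = (r, c)
--                 if col_blank[c] is None:
--                     col_blank[c] = (r, c)
--                 if r == c and diag_blank is None:
--                     diag_blank = (r, c)
--                 if c == n - 1 - r and anti_blank is None:
--                     anti_blank = (r, c)
--     for r in range(n):
--         if row_cnt[r] == n - 1 and row_blank[r] is not None:
--             return row_blank[r]
--     for c in range(n):
--         if col_cnt[c] == n - 1 and col_blank[c] is not None:
--             return col_blank[c]
--     if diag_cnt == n - 1 and diag_blank is not None:
--         return diag_blank
--     if anti_cnt == n - 1 and anti_blank is not None: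
--         return anti_blank
--     return None
-- ===== Notes on version B (the rewrite author's own statement) =====
-- stated objective: alternative
-- what changed: Replaces A's staged per-line count-then-rescan passes by a single sweep over the grid that tallies per-row/per-column/diagonal symbol counters and the first blank of each line at once, followed by a short check phase in A's section order.
-- outside the precondition, e.g. on blocking_strategy('X', [['X', ' '], ['X']]): A returns (0, 1), B raises IndexError
import Mathlib
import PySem

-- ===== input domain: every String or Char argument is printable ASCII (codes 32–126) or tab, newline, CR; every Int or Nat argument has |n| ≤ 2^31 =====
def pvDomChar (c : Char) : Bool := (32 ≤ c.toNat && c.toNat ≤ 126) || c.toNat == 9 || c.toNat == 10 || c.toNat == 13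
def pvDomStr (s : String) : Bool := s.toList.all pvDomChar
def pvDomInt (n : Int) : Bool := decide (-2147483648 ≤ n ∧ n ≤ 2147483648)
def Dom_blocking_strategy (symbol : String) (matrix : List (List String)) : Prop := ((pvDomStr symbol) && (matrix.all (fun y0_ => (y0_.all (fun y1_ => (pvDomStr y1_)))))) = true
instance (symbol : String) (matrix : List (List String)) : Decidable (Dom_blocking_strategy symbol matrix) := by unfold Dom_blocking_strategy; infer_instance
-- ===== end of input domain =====

-- B replaces A's staged per-line count-then-rescan passes by ONE sweep over the grid that
-- tallies per-row/per-column/diagonal symbol counters and first-blank positions, then a short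
-- check phase in A's section order (alternative decomposition, same asymptotic cost).

-- shared cell accessor: matrix[r][c] (in range on every input admitted by Pre_)
def pvCell (matrix : List (List String)) (r c : Nat) : String := (matrix.getD r []).getD c ""

-- ===== PORT A =====
def blocking_strategy (symbol : String) (matrix : List (List String)) : Option (Int × Int) :=
  let n := matrix.length
  -- rows section: count this row's symbols, then (on n-1) rescan the row for the blank
  ((List.range n).findSome? (fun row =>
      let cnt : Int := (List.range n).foldl (fun acc col => if pvCell matrix row col = symbol then acc + 1 else acc) 0
      if cnt = (n : Int) - 1 then
        (List.range n).findSome? (fun col => if pvCell matrix row col = " " then some ((row : Int), (col : Int)) else none)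
      else none)).or (
  -- cols section
  ((List.range n).findSome? (fun col =>
      let cnt : Int := (List.range n).foldl (fun acc row => if pvCell matrix row col = symbol then acc + 1 else acc) 0
      if cnt = (n : Int) - 1 then
        (List.range n).findSome? (fun row => if pvCell matrix row col = " " then some ((row : Int), (col : Int)) else none)
      else none)).or (
  -- diagonal section
  (let cntD : Int := (List.range n).foldl (fun acc i => if pvCell matrix i i = symbol then acc + 1 else acc) 0
   if cntD = (n : Int) - 1 then
     (List.range n).findSome? (fun i => if pvCell matrix i i = " " then some ((i : Int), (i : Int)) else none)
   else none).or (
  -- antidiagonal section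
  (let cntA : Int := (List.range n).foldl (fun acc i => if pvCell matrix i (n - 1 - i) = symbol then acc + 1 else acc) 0
   if cntA = (n : Int) - 1 then
     (List.range n).findSome? (fun i => if pvCell matrix i (n - 1 - i) = " " then some ((i : Int), ((n - 1 - i : Nat) : Int)) else none)
   else none))))

-- ===== PORT B =====
-- the tally state of Source B's single pass
structure BState where
  rowCnt : List Int
  colCnt : List Int
  diagCnt : Int
  antiCnt : Int
  rowBlank : List (Option (Int × Int))
  colBlank : List (Option (Int × Int))
  diagBlank : Option (Int × Int)
  antiBlank : Option (Int × Int)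

-- one cell of Source B's sweep (two independent `if`s, as in Source B)
def bStep (symbol : String) (matrix : List (List String)) (n : Nat) (s : BState) (r c : Nat) : BState :=
  let cell := pvCell matrix r c
  let s1 :=
    if cell = symbol then
      { s with rowCnt := s.rowCnt.set r (s.rowCnt.getD r 0 + 1),
               colCnt := s.colCnt.set c (s.colCnt.getD c 0 + 1),
               diagCnt := if r = c then s.diagCnt + 1 else s.diagCnt,
               antiCnt := if c = n - 1 - r then s.antiCnt + 1 else s.antiCnt }
    else s
  if cell = " " then
    { s1 with rowBlank := if s1.rowBlank.getD r none = none then s1.rowBlank.set r (some ((r : Int), (c : Int))) else s1.rowBlank,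
              colBlank := if s1.colBlank.getD c none = none then s1.colBlank.set c (some ((r : Int), (c : Int))) else s1.colBlank,
              diagBlank := if r = c ∧ s1.diagBlank = none then some ((r : Int), (c : Int)) else s1.diagBlank,
              antiBlank := if c = n - 1 - r ∧ s1.antiBlank = none then some ((r : Int), (c : Int)) else s1.antiBlank }
  else s1

def blocking_strategy_alt (symbol : String) (matrix : List (List String)) : Option (Int × Int) :=
  let n := matrix.length
  let init : BState :=
    ⟨List.replicate n 0, List.replicate n 0, 0, 0, List.replicate n none, List.replicate n none, none, none⟩
  let s := (List.range n).foldl (fun s r => (List.range n).foldl (fun s c => bStep symbol matrix n s r c) s) init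
  ((List.range n).findSome? (fun r => if s.rowCnt.getD r 0 = (n : Int) - 1 then s.rowBlank.getD r none else none)).or
  ((((List.range n).findSome? (fun c => if s.colCnt.getD c 0 = (n : Int) - 1 then s.colBlank.getD c none else none))).or
  ((if s.diagCnt = (n : Int) - 1 then s.diagBlank else none).or
  (if s.antiCnt = (n : Int) - 1 then s.antiBlank else none)))

-- ===== PRECONDITION & SPEC =====
-- Pre_ excludes ragged matrices (some row shorter than len(matrix)): there Python A raises
-- IndexError on the first short cell its staged scans touch — except on rare ragged inputs where
-- an earlier complete line already returns before the short row is read; B's single pass reads the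
-- whole grid first and raises on all of them, so those early-return ragged inputs are excluded too.
def Pre_blocking_strategy (symbol : String) (matrix : List (List String)) : Prop :=
  ∀ row ∈ matrix, matrix.length ≤ row.length
instance (symbol : String) (matrix : List (List String)) : Decidable (Pre_blocking_strategy symbol matrix) := by unfold Pre_blocking_strategy; infer_instance

def pvWitness_blocking_strategy : String × List (List String) := ("X", [["X", " "], [" ", "X"]])

def Spec_blocking_strategy (symbol : String) (matrix : List (List String)) (out : Option (Int × Int)) : Prop := out = blocking_strategy_alt symbol matrix
instance (symbol : String) (matrix : List (List String)) (out : Option (Int × Int)) : Decidable (Spec_blocking_strategy symbol matrix out) := by unfold Spec_blocking_strategy; infer_instance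

-- ===== CLAIM (what is proved, stated in full; the proofs are below) =====
def Claim_equal_blocking_strategy : Prop := ∀ (symbol : String) (matrix : List (List String)), Dom_blocking_strategy symbol matrix → Pre_blocking_strategy symbol matrix → Spec_blocking_strategy symbol matrix (blocking_strategy symbol matrix)

-- ===== LEMMAS AND PROOFS =====

theorem pvWitness_ok : Dom_blocking_strategy pvWitness_blocking_strategy.1 pvWitness_blocking_strategy.2 ∧ Pre_blocking_strategy pvWitness_blocking_strategy.1 pvWitness_blocking_strategy.2 := by
  constructor <;> decide

-- scalar foldl count = countP
theorem pv_scnt {α : Type} (P : α → Prop) [DecidablePred P] (L : List α) (a : Int) :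
    L.foldl (fun acc p => if P p then acc + 1 else acc) a = a + (L.countP (fun p => decide (P p)) : Int) := by
  induction L generalizing a with
  | nil => simp
  | cons p L ih =>
    simp only [List.foldl_cons, List.countP_cons]
    by_cases h : P p <;> simp [h, ih] <;> push_cast <;> ring

-- scalar first-blank fold = Option.or of findSome?
theorem pv_sblank {α β : Type} (Q : α → Prop) [DecidablePred Q] (g : α → β) (L : List α) (o : Option β) :
    L.foldl (fun o p => if Q p ∧ o = none then some (g p) else o) o
      = o.or (L.findSome? (fun p => if Q p then some (g p) else none)) := by
  induction L generalizing o with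
  | nil => cases o <;> simp
  | cons p L ih =>
    simp only [List.foldl_cons, List.findSome?_cons]
    by_cases h : Q p
    · cases o with
      | none => simp [h, ih]
      | some v => simp [h, ih]
    · simp [h, ih]

-- indexed counter fold, pointwise
theorem pv_icnt {α : Type} (f : α → Nat) (P : α → Prop) [DecidablePred P] (L : List α) :
    ∀ (l : List Int) (i : Nat), i < l.length →
    (L.foldl (fun l p => if P p then l.set (f p) (l.getD (f p) 0 + 1) else l) l).getD i 0
      = l.getD i 0 + (L.countP (fun p => decide (f p = i) && decide (P p)) : Int) := by
  induction L with
  | nil => intro l i hi; simp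
  | cons p L ih =>
    intro l i hi
    simp only [List.foldl_cons, List.countP_cons]
    by_cases hP : P p
    · rw [if_pos hP]
      rw [ih _ i (by simp [hi])]
      by_cases hf : f p = i
      · subst hf
        have e : (l.set (f p) (l.getD (f p) 0 + 1)).getD (f p) 0 = l.getD (f p) 0 + 1 := by
          simp [List.getD, List.getElem?_set_self', List.getElem?_eq_getElem hi]
        rw [e]
        simp [hP]
        ring
      · have e : (l.set (f p) (l.getD (f p) 0 + 1)).getD i 0 = l.getD i 0 := by
          simp [List.getD, List.getElem?_set_ne hf]
        rw [e]
        simp [hf]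
    · rw [if_neg hP, ih _ i hi]
      simp [hP]

-- indexed first-blank fold, pointwise
theorem pv_iblank {α β : Type} (f : α → Nat) (Q : α → Prop) [DecidablePred Q] (g : α → β) (L : List α) :
    ∀ (l : List (Option β)) (i : Nat), i < l.length →
    (L.foldl (fun l p => if Q p then (if l.getD (f p) none = none then l.set (f p) (some (g p)) else l) else l) l).getD i none
      = (l.getD i none).or (L.findSome? (fun p => if f p = i ∧ Q p then some (g p) else none)) := by
  induction L with
  | nil =>
    intro l i hi
    cases h : l[i]? <;> simp [List.getD, h]
  | cons p L ih =>
    intro l i hi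
    simp only [List.foldl_cons, List.findSome?_cons]
    by_cases hQ : Q p
    · rw [if_pos hQ]
      by_cases h : l.getD (f p) none = none
      · rw [if_pos h, ih _ _ (by simp [hi])]
        by_cases hf : f p = i
        · subst hf
          have e2 : (l.set (f p) (some (g p))).getD (f p) none = some (g p) := by
            simp [List.getD, List.getElem?_set_self', List.getElem?_eq_getElem hi]
          rw [e2]
          simp [hQ, List.getD] at h ⊢
          simp [h]
        · have e2 : (l.set (f p) (some (g p))).getD i none = l.getD i none := by
            simp [List.getD, List.getElem?_set_ne hf]
          rw [e2]
          simp [hf]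
      · rw [if_neg h, ih _ _ hi]
        by_cases hf : f p = i
        · subst hf
          cases hv : l.getD (f p) none with
          | none => exact absurd hv h
          | some v => simp [hQ]
        · simp [hf]
    · rw [if_neg hQ, ih _ _ hi]
      simp [hQ]

-- nested foldl over two ranges = foldl over the flattened cell list
theorem pv_nest {α β σ : Type} (l1 : List α) (l2 : List β) (F : σ → α → β → σ) (s : σ) :
    l1.foldl (fun s a => l2.foldl (fun s b => F s a b) s) s
      = (l1.flatMap (fun a => l2.map (fun b => (a, b)))).foldl (fun s p => F s p.1 p.2) s := by
  induction l1 generalizing s with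
  | nil => rfl
  | cons a l1 ih => simp [List.foldl_append, List.foldl_map, ih]

-- findSome? congruence on members
theorem pv_findSome_congr {α β : Type} (l : List α) (f g : α → Option β)
    (h : ∀ x ∈ l, f x = g x) : l.findSome? f = l.findSome? g := by
  induction l with
  | nil => rfl
  | cons x l ih =>
    simp only [List.findSome?_cons, h x (by simp)]
    cases g x with
    | some v => rfl
    | none => exact ih (fun y hy => h y (by simp [hy]))

-- findSome? over flatMap
theorem pv_findSome_flatMap {α β γ : Type} (l : List α) (f : α → List β) (g : β → Option γ) :
    (l.flatMap f).findSome? g = l.findSome? (fun a => (f a).findSome? g) := by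
  induction l with
  | nil => rfl
  | cons a l ih =>
    simp only [List.flatMap_cons, List.findSome?_append, List.findSome?_cons, ih]
    cases (f a).findSome? g <;> rfl

-- countP over flatMap
theorem pv_countP_flatMap {α β : Type} (l : List α) (f : α → List β) (p : β → Bool) :
    (l.flatMap f).countP p = (l.map (fun a => (f a).countP p)).sum := by
  induction l with
  | nil => rfl
  | cons a l ih => simp [List.countP_append, ih]

-- findSome? supported at one point
theorem pv_findSome_support {β : Type} (l : List Nat) (i : Nat) (g : Nat → Option β) :
    i ∈ l → (∀ x ∈ l, x ≠ i → g x = none) → l.findSome? g = g i := by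
  induction l with
  | nil => intro hi; cases hi
  | cons x l ih =>
    intro hi h
    simp only [List.findSome?_cons]
    by_cases hx : x = i
    · subst hx
      cases hg : g x with
      | some v => rfl
      | none =>
        have : ∀ y ∈ l, g y = none := by
          intro y hy
          by_cases hy' : y = x
          · subst hy'; exact hg
          · exact h y (List.mem_cons_of_mem _ hy) hy'
        rw [List.findSome?_eq_none_iff.2 this]
    · rw [h x List.mem_cons_self hx]
      exact ih ((List.mem_cons.1 hi).resolve_left (fun e => hx e.symm)) (fun y hy => h y (List.mem_cons_of_mem _ hy))

-- sum supported at one point (on a Nodup list)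
theorem pv_sum_support (l : List Nat) (i : Nat) (g : Nat → Nat) :
    l.Nodup → i ∈ l → (∀ x ∈ l, x ≠ i → g x = 0) → (l.map g).sum = g i := by
  induction l with
  | nil => intro _ hi; cases hi
  | cons x l ih =>
    intro hnd hi h
    simp only [List.map_cons, List.sum_cons]
    by_cases hx : x = i
    · subst hx
      have hz : ∀ y ∈ l, g y = 0 := by
        intro y hy
        have hne : y ≠ x := fun e => (List.nodup_cons.1 hnd).1 (e ▸ hy)
        exact h y (List.mem_cons_of_mem _ hy) hne
      have : (l.map g).sum = 0 := by
        apply List.sum_eq_zero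
        intro y hy
        obtain ⟨z, hz2, rfl⟩ := List.mem_map.1 hy
        exact hz z hz2
      omega
    · rw [h x List.mem_cons_self hx,
        ih (List.nodup_cons.1 hnd).2 ((List.mem_cons.1 hi).resolve_left (fun e => hx e.symm))
          (fun y hy => h y (List.mem_cons_of_mem _ hy))]
      omega

-- countP of a point predicate on a Nodup list
theorem pv_countP_point (l : List Nat) (i : Nat) (q : Nat → Bool) :
    l.Nodup → i ∈ l → l.countP (fun x => decide (x = i) && q x) = if q i then 1 else 0 := by
  induction l with
  | nil => intro _ hi; cases hi
  | cons x l ih =>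
    intro hnd hi
    simp only [List.countP_cons]
    by_cases hx : x = i
    · subst hx
      have hz : l.countP (fun y => decide (y = x) && q y) = 0 := by
        rw [List.countP_eq_zero]
        intro y hy
        have hne : y ≠ x := fun e => (List.nodup_cons.1 hnd).1 (e ▸ hy)
        simp [hne]
      rw [hz]
      by_cases hq : q x <;> simp [hq]
    · rw [ih (List.nodup_cons.1 hnd).2 ((List.mem_cons.1 hi).resolve_left (fun e => hx e.symm))]
      simp [hx]

-- sum of indicator map = countP
theorem pv_sum_indicator {α : Type} (l : List α) (p : α → Bool) :
    (l.map (fun x => if p x then 1 else 0)).sum = l.countP p := by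
  induction l with
  | nil => rfl
  | cons x l ih => by_cases h : p x <;> simp [h, ih, List.countP_cons, Nat.add_comm]


-- all remaining helpers are proof-only (used below the claim block)

-- the grid's cell list in Source B's sweep order
def pvCells (n : Nat) : List (Nat × Nat) := (List.range n).flatMap (fun r => (List.range n).map (fun c => (r, c)))

-- common normal form of both ports
def pvN (symbol : String) (matrix : List (List String)) : Option (Int × Int) :=
  let n := matrix.length
  ((List.range n).findSome? (fun r =>
      if ((List.range n).countP (fun c => decide (pvCell matrix r c = symbol)) : Int) = (n : Int) - 1 then
        (List.range n).findSome? (fun c => if pvCell matrix r c = " " then some ((r : Int), (c : Int)) else none)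
      else none)).or (
  ((List.range n).findSome? (fun c =>
      if ((List.range n).countP (fun r => decide (pvCell matrix r c = symbol)) : Int) = (n : Int) - 1 then
        (List.range n).findSome? (fun r => if pvCell matrix r c = " " then some ((r : Int), (c : Int)) else none)
      else none)).or (
  (if ((List.range n).countP (fun i => decide (pvCell matrix i i = symbol)) : Int) = (n : Int) - 1 then
     (List.range n).findSome? (fun i => if pvCell matrix i i = " " then some ((i : Int), (i : Int)) else none)
   else none).or (
  if ((List.range n).countP (fun i => decide (pvCell matrix i (n - 1 - i) = symbol)) : Int) = (n : Int) - 1 then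
     (List.range n).findSome? (fun i => if pvCell matrix i (n - 1 - i) = " " then some ((i : Int), ((n - 1 - i : Nat) : Int)) else none)
   else none)))

theorem pv_getD_replicate {α : Type} (n i : Nat) (a : α) : (List.replicate n a).getD i a = a := by
  simp [List.getD, List.getElem?_replicate]
  split <;> rfl

-- projections of Source B's sweep: each tally evolves by its own fold
theorem bfold_rowCnt (symbol : String) (matrix : List (List String)) (n : Nat) (L : List (Nat × Nat)) :
    ∀ s : BState, (L.foldl (fun s p => bStep symbol matrix n s p.1 p.2) s).rowCnt
      = L.foldl (fun l p => if pvCell matrix p.1 p.2 = symbol then l.set p.1 (l.getD p.1 0 + 1) else l) s.rowCnt := by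
  induction L with
  | nil => intro s; rfl
  | cons p L ih =>
    intro s
    rw [List.foldl_cons, List.foldl_cons, ih]
    congr 1
    by_cases h1 : pvCell matrix p.1 p.2 = symbol <;> by_cases h2 : pvCell matrix p.1 p.2 = " " <;>
      simp [bStep, h1, h2, apply_ite BState.rowCnt]

theorem bfold_colCnt (symbol : String) (matrix : List (List String)) (n : Nat) (L : List (Nat × Nat)) :
    ∀ s : BState, (L.foldl (fun s p => bStep symbol matrix n s p.1 p.2) s).colCnt
      = L.foldl (fun l p => if pvCell matrix p.1 p.2 = symbol then l.set p.2 (l.getD p.2 0 + 1) else l) s.colCnt := by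
  induction L with
  | nil => intro s; rfl
  | cons p L ih =>
    intro s
    rw [List.foldl_cons, List.foldl_cons, ih]
    congr 1
    by_cases h1 : pvCell matrix p.1 p.2 = symbol <;> by_cases h2 : pvCell matrix p.1 p.2 = " " <;>
      simp [bStep, h1, h2, apply_ite BState.colCnt]

theorem bfold_diagCnt (symbol : String) (matrix : List (List String)) (n : Nat) (L : List (Nat × Nat)) :
    ∀ s : BState, (L.foldl (fun s p => bStep symbol matrix n s p.1 p.2) s).diagCnt
      = L.foldl (fun a p => if p.1 = p.2 ∧ pvCell matrix p.1 p.2 = symbol then a + 1 else a) s.diagCnt := by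
  induction L with
  | nil => intro s; rfl
  | cons p L ih =>
    intro s
    rw [List.foldl_cons, List.foldl_cons, ih]
    congr 1
    by_cases h1 : pvCell matrix p.1 p.2 = symbol <;> by_cases h2 : pvCell matrix p.1 p.2 = " " <;>
      by_cases h3 : p.1 = p.2 <;> simp [bStep, h1, h2, h3, apply_ite BState.diagCnt]

theorem bfold_antiCnt (symbol : String) (matrix : List (List String)) (n : Nat) (L : List (Nat × Nat)) :
    ∀ s : BState, (L.foldl (fun s p => bStep symbol matrix n s p.1 p.2) s).antiCnt
      = L.foldl (fun a p => if p.2 = n - 1 - p.1 ∧ pvCell matrix p.1 p.2 = symbol then a + 1 else a) s.antiCnt := by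
  induction L with
  | nil => intro s; rfl
  | cons p L ih =>
    intro s
    rw [List.foldl_cons, List.foldl_cons, ih]
    congr 1
    by_cases h1 : pvCell matrix p.1 p.2 = symbol <;> by_cases h2 : pvCell matrix p.1 p.2 = " " <;>
      by_cases h3 : p.2 = n - 1 - p.1 <;> simp [bStep, h1, h2, h3, apply_ite BState.antiCnt]

theorem bfold_rowBlank (symbol : String) (matrix : List (List String)) (n : Nat) (L : List (Nat × Nat)) :
    ∀ s : BState, (L.foldl (fun s p => bStep symbol matrix n s p.1 p.2) s).rowBlank
      = L.foldl (fun l p => if pvCell matrix p.1 p.2 = " " then (if l.getD p.1 none = none then l.set p.1 (some ((p.1 : Int), (p.2 : Int))) else l) else l) s.rowBlank := by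
  induction L with
  | nil => intro s; rfl
  | cons p L ih =>
    intro s
    rw [List.foldl_cons, List.foldl_cons, ih]
    congr 1
    by_cases h1 : pvCell matrix p.1 p.2 = symbol <;> by_cases h2 : pvCell matrix p.1 p.2 = " " <;>
      simp [bStep, h1, h2, apply_ite BState.rowBlank]

theorem bfold_colBlank (symbol : String) (matrix : List (List String)) (n : Nat) (L : List (Nat × Nat)) :
    ∀ s : BState, (L.foldl (fun s p => bStep symbol matrix n s p.1 p.2) s).colBlank
      = L.foldl (fun l p => if pvCell matrix p.1 p.2 = " " then (if l.getD p.2 none = none then l.set p.2 (some ((p.1 : Int), (p.2 : Int))) else l) else l) s.colBlank := by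
  induction L with
  | nil => intro s; rfl
  | cons p L ih =>
    intro s
    rw [List.foldl_cons, List.foldl_cons, ih]
    congr 1
    by_cases h1 : pvCell matrix p.1 p.2 = symbol <;> by_cases h2 : pvCell matrix p.1 p.2 = " " <;>
      simp [bStep, h1, h2, apply_ite BState.colBlank]

theorem bfold_diagBlank (symbol : String) (matrix : List (List String)) (n : Nat) (L : List (Nat × Nat)) :
    ∀ s : BState, (L.foldl (fun s p => bStep symbol matrix n s p.1 p.2) s).diagBlank
      = L.foldl (fun o p => if (p.1 = p.2 ∧ pvCell matrix p.1 p.2 = " ") ∧ o = none then some ((p.1 : Int), (p.2 : Int)) else o) s.diagBlank := by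
  induction L with
  | nil => intro s; rfl
  | cons p L ih =>
    intro s
    rw [List.foldl_cons, List.foldl_cons, ih]
    congr 1
    by_cases h1 : pvCell matrix p.1 p.2 = symbol <;> by_cases h2 : pvCell matrix p.1 p.2 = " " <;>
      by_cases h3 : p.1 = p.2 <;> by_cases h4 : s.diagBlank = none <;> simp [bStep, h1, h2, h3, h4, apply_ite BState.diagBlank]

theorem bfold_antiBlank (symbol : String) (matrix : List (List String)) (n : Nat) (L : List (Nat × Nat)) :
    ∀ s : BState, (L.foldl (fun s p => bStep symbol matrix n s p.1 p.2) s).antiBlank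
      = L.foldl (fun o p => if (p.2 = n - 1 - p.1 ∧ pvCell matrix p.1 p.2 = " ") ∧ o = none then some ((p.1 : Int), (p.2 : Int)) else o) s.antiBlank := by
  induction L with
  | nil => intro s; rfl
  | cons p L ih =>
    intro s
    rw [List.foldl_cons, List.foldl_cons, ih]
    congr 1
    by_cases h1 : pvCell matrix p.1 p.2 = symbol <;> by_cases h2 : pvCell matrix p.1 p.2 = " " <;>
      by_cases h3 : p.2 = n - 1 - p.1 <;> by_cases h4 : s.antiBlank = none <;> simp [bStep, h1, h2, h3, h4, apply_ite BState.antiBlank]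


-- aggregation of the sweep's cell-level tallies into per-line quantities
theorem pv_cells_countP_fst (n i : Nat) (q : Nat → Nat → Bool) (hi : i < n) :
    (pvCells n).countP (fun p => decide (p.1 = i) && q p.1 p.2) = (List.range n).countP (fun c => q i c) := by
  unfold pvCells
  rw [pv_countP_flatMap]
  rw [pv_sum_support _ i _ List.nodup_range (List.mem_range.2 hi)]
  · rw [List.countP_map]
    apply List.countP_congr
    intro c _
    simp
  · intro x _ hxi
    rw [List.countP_map]
    rw [List.countP_eq_zero]
    intro c _
    simp [hxi]

theorem pv_cells_countP_snd (n i : Nat) (q : Nat → Nat → Bool) (hi : i < n) :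
    (pvCells n).countP (fun p => decide (p.2 = i) && q p.1 p.2) = (List.range n).countP (fun r => q r i) := by
  unfold pvCells
  rw [pv_countP_flatMap]
  have e : (List.range n).map (fun r => ((List.range n).map (fun c => (r, c))).countP (fun p => decide (p.2 = i) && q p.1 p.2))
      = (List.range n).map (fun r => if q r i then 1 else 0) := by
    apply List.map_congr_left
    intro r _
    rw [List.countP_map]
    exact pv_countP_point (List.range n) i (q r) List.nodup_range (List.mem_range.2 hi)
  rw [e, pv_sum_indicator]

theorem pv_cells_countP_diag (n : Nat) (q : Nat → Nat → Bool) :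
    (pvCells n).countP (fun p => decide (p.1 = p.2) && q p.1 p.2) = (List.range n).countP (fun r => q r r) := by
  unfold pvCells
  rw [pv_countP_flatMap]
  have e : (List.range n).map (fun r => ((List.range n).map (fun c => (r, c))).countP (fun p => decide (p.1 = p.2) && q p.1 p.2))
      = (List.range n).map (fun r => if q r r then 1 else 0) := by
    apply List.map_congr_left
    intro r hr
    rw [List.countP_map]
    have e2 : ∀ c ∈ List.range n, (((fun p => decide (p.1 = p.2) && q p.1 p.2) ∘ fun c => (r, c)) c = true)
        ↔ ((fun c => decide (c = r) && q r c) c = true) := by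
      intro c _
      simp only [Function.comp_def, Bool.and_eq_true, decide_eq_true_eq]
      exact and_congr_left' ⟨Eq.symm, Eq.symm⟩
    rw [List.countP_congr e2]
    exact pv_countP_point (List.range n) r (q r) List.nodup_range hr
  rw [e, pv_sum_indicator]

theorem pv_cells_countP_anti (n : Nat) (q : Nat → Nat → Bool) :
    (pvCells n).countP (fun p => decide (p.2 = n - 1 - p.1) && q p.1 p.2) = (List.range n).countP (fun r => q r (n - 1 - r)) := by
  unfold pvCells
  rw [pv_countP_flatMap]
  have e : (List.range n).map (fun r => ((List.range n).map (fun c => (r, c))).countP (fun p => decide (p.2 = n - 1 - p.1) && q p.1 p.2))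
      = (List.range n).map (fun r => if q r (n - 1 - r) then 1 else 0) := by
    apply List.map_congr_left
    intro r hr
    rw [List.countP_map]
    have hlt : n - 1 - r < n := by
      have := List.mem_range.1 hr
      omega
    exact pv_countP_point (List.range n) (n - 1 - r) (q r) List.nodup_range (List.mem_range.2 hlt)
  rw [e, pv_sum_indicator]

theorem pv_cells_find_fst {β : Type} (n i : Nat) (Q : Nat → Nat → Prop) [∀ a b, Decidable (Q a b)] (g : Nat → Nat → β) (hi : i < n) :
    (pvCells n).findSome? (fun p => if p.1 = i ∧ Q p.1 p.2 then some (g p.1 p.2) else none)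
      = (List.range n).findSome? (fun c => if Q i c then some (g i c) else none) := by
  unfold pvCells
  rw [pv_findSome_flatMap]
  rw [pv_findSome_support (List.range n) i
    (fun r => ((List.range n).map (fun c => (r, c))).findSome? (fun p => if p.1 = i ∧ Q p.1 p.2 then some (g p.1 p.2) else none))
    (List.mem_range.2 hi) ?_]
  · simp only [List.findSome?_map, Function.comp_def]
    apply pv_findSome_congr
    intro c _
    simp
  · intro x _ hxi
    beta_reduce
    rw [List.findSome?_map, List.findSome?_eq_none_iff]
    intro c _
    simp [Function.comp_def, hxi]

theorem pv_cells_find_snd {β : Type} (n i : Nat) (Q : Nat → Nat → Prop) [∀ a b, Decidable (Q a b)] (g : Nat → Nat → β) (hi : i < n) :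
    (pvCells n).findSome? (fun p => if p.2 = i ∧ Q p.1 p.2 then some (g p.1 p.2) else none)
      = (List.range n).findSome? (fun r => if Q r i then some (g r i) else none) := by
  unfold pvCells
  rw [pv_findSome_flatMap]
  apply pv_findSome_congr
  intro r _
  simp only [List.findSome?_map, Function.comp_def]
  rw [pv_findSome_support (List.range n) i
    (fun c => if c = i ∧ Q r c then some (g r c) else none) (List.mem_range.2 hi) ?_]
  · simp
  · intro c _ hci
    simp [hci]

theorem pv_cells_find_diag {β : Type} (n : Nat) (Q : Nat → Nat → Prop) [∀ a b, Decidable (Q a b)] (g : Nat → Nat → β) :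
    (pvCells n).findSome? (fun p => if p.1 = p.2 ∧ Q p.1 p.2 then some (g p.1 p.2) else none)
      = (List.range n).findSome? (fun r => if Q r r then some (g r r) else none) := by
  unfold pvCells
  rw [pv_findSome_flatMap]
  apply pv_findSome_congr
  intro r hr
  simp only [List.findSome?_map, Function.comp_def]
  rw [pv_findSome_support (List.range n) r
    (fun c => if r = c ∧ Q r c then some (g r c) else none) hr ?_]
  · simp
  · intro c _ hcr
    simp only [ite_eq_right_iff]
    intro h
    exact absurd h.1.symm hcr

theorem pv_cells_find_anti {β : Type} (n : Nat) (Q : Nat → Nat → Prop) [∀ a b, Decidable (Q a b)] (g : Nat → Nat → β) :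
    (pvCells n).findSome? (fun p => if p.2 = n - 1 - p.1 ∧ Q p.1 p.2 then some (g p.1 p.2) else none)
      = (List.range n).findSome? (fun r => if Q r (n - 1 - r) then some (g r (n - 1 - r)) else none) := by
  unfold pvCells
  rw [pv_findSome_flatMap]
  apply pv_findSome_congr
  intro r hr
  simp only [List.findSome?_map, Function.comp_def]
  have hlt : n - 1 - r < n := by
    have := List.mem_range.1 hr
    omega
  rw [pv_findSome_support (List.range n) (n - 1 - r)
    (fun c => if c = n - 1 - r ∧ Q r c then some (g r c) else none) (List.mem_range.2 hlt) ?_]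
  · simp
  · intro c _ hc
    simp [hc]


-- Port A in normal form: loop counts become countP
theorem pv_A_eq (symbol : String) (matrix : List (List String)) :
    blocking_strategy symbol matrix = pvN symbol matrix := by
  unfold blocking_strategy pvN
  simp only [pv_scnt, zero_add]


-- Port B in normal form
theorem pv_B_eq (symbol : String) (matrix : List (List String)) :
    blocking_strategy_alt symbol matrix = pvN symbol matrix := by
  unfold blocking_strategy_alt pvN
  dsimp only []
  rw [pv_nest (List.range matrix.length) (List.range matrix.length)
      (fun s a b => bStep symbol matrix matrix.length s a b)]
  rw [show (List.range matrix.length).flatMap (fun a => (List.range matrix.length).map fun b => (a, b)) = pvCells matrix.length from rfl]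
  rw [bfold_rowCnt symbol matrix matrix.length (pvCells matrix.length),
      bfold_colCnt symbol matrix matrix.length (pvCells matrix.length),
      bfold_diagCnt symbol matrix matrix.length (pvCells matrix.length),
      bfold_antiCnt symbol matrix matrix.length (pvCells matrix.length),
      bfold_rowBlank symbol matrix matrix.length (pvCells matrix.length),
      bfold_colBlank symbol matrix matrix.length (pvCells matrix.length),
      bfold_diagBlank symbol matrix matrix.length (pvCells matrix.length),
      bfold_antiBlank symbol matrix matrix.length (pvCells matrix.length)]
  dsimp only []
  rw [pv_scnt (fun p : Nat × Nat => p.1 = p.2 ∧ pvCell matrix p.1 p.2 = symbol) (pvCells matrix.length) 0,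
      pv_scnt (fun p : Nat × Nat => p.2 = matrix.length - 1 - p.1 ∧ pvCell matrix p.1 p.2 = symbol) (pvCells matrix.length) 0,
      pv_sblank (fun p : Nat × Nat => p.1 = p.2 ∧ pvCell matrix p.1 p.2 = " ") (fun p => ((p.1 : Int), (p.2 : Int))) (pvCells matrix.length) none,
      pv_sblank (fun p : Nat × Nat => p.2 = matrix.length - 1 - p.1 ∧ pvCell matrix p.1 p.2 = " ") (fun p => ((p.1 : Int), (p.2 : Int))) (pvCells matrix.length) none]
  simp only [zero_add, Option.none_or, Bool.decide_and]
  rw [pv_cells_countP_diag matrix.length (fun a b => decide (pvCell matrix a b = symbol)),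
      pv_cells_countP_anti matrix.length (fun a b => decide (pvCell matrix a b = symbol)),
      pv_cells_find_diag matrix.length (fun a b => pvCell matrix a b = " ") (fun a b => ((a : Int), (b : Int))),
      pv_cells_find_anti matrix.length (fun a b => pvCell matrix a b = " ") (fun a b => ((a : Int), (b : Int)))]
  congr 1
  · apply pv_findSome_congr
    intro r hr
    have hr' := List.mem_range.1 hr
    rw [pv_icnt (fun p : Nat × Nat => p.1) (fun p : Nat × Nat => pvCell matrix p.1 p.2 = symbol) (pvCells matrix.length) (List.replicate matrix.length 0) r (by simpa using hr')]
    rw [pv_getD_replicate, zero_add]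
    rw [pv_iblank (fun p : Nat × Nat => p.1) (fun p : Nat × Nat => pvCell matrix p.1 p.2 = " ") (fun p => ((p.1 : Int), (p.2 : Int))) (pvCells matrix.length) (List.replicate matrix.length none) r (by simpa using hr')]
    rw [pv_getD_replicate]
    simp only [Option.none_or]
    rw [pv_cells_countP_fst matrix.length r (fun a b => decide (pvCell matrix a b = symbol)) hr']
    rw [pv_cells_find_fst matrix.length r (fun a b => pvCell matrix a b = " ") (fun a b => ((a : Int), (b : Int))) hr']
  congr 1
  apply pv_findSome_congr
  intro c hc
  have hc' := List.mem_range.1 hc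
  rw [pv_icnt (fun p : Nat × Nat => p.2) (fun p : Nat × Nat => pvCell matrix p.1 p.2 = symbol) (pvCells matrix.length) (List.replicate matrix.length 0) c (by simpa using hc')]
  rw [pv_getD_replicate, zero_add]
  rw [pv_iblank (fun p : Nat × Nat => p.2) (fun p : Nat × Nat => pvCell matrix p.1 p.2 = " ") (fun p => ((p.1 : Int), (p.2 : Int))) (pvCells matrix.length) (List.replicate matrix.length none) c (by simpa using hc')]
  rw [pv_getD_replicate]
  simp only [Option.none_or]
  rw [pv_cells_countP_snd matrix.length c (fun a b => decide (pvCell matrix a b = symbol)) hc']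
  rw [pv_cells_find_snd matrix.length c (fun a b => pvCell matrix a b = " ") (fun a b => ((a : Int), (b : Int))) hc']

-- ===== VERDICT (by name: the statement is the Claim_ definition above) =====
theorem blocking_strategy_spec : Claim_equal_blocking_strategy := by
  intro symbol matrix _ _
  unfold Spec_blocking_strategy
  rw [pv_A_eq, pv_B_eq]
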